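-- pv_equiv track=rewrite | github.com/Auto-runs/xss-scanner | detection/analyzer_v2.py | _is_strict
-- ===== SOURCE A (Python) =====
-- def _is_strict(directives: dict) -> bool:
--     script_src = directives.get("script-src", directives.get("default-src", []))
--     if not script_src:
--         return False
--     has_nonce = any("nonce-" in s for s in script_src)
--     has_hash  = any(s.startswith("sha") for s in script_src)
--     has_strict_dyn = "'strict-dynamic'" in script_src
--     no_unsafe  = "'unsafe-inline'" not in script_src and "'unsafe-eval'" not in script_src
--     no_wildcard = "*" not in script_src
--     return (has_nonce or has_hash) and has_strict_dyn and no_unsafe and no_wildcard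
-- ===== SOURCE B (Python) =====
-- _KEYED, _DYN, _BAD = 1, 2, 4
--
-- def _classify(s):
--     bits = 0
--     if "nonce-" in s or s.startswith("sha"):
--         bits |= _KEYED
--     if s == "'strict-dynamic'":
--         bits |= _DYN
--     if s in ("'unsafe-inline'", "'unsafe-eval'", "*"):
--         bits |= _BAD
--     return bits
--
-- def _is_strict(directives: dict) -> bool:
--     script_src = directives.get("script-src", directives.get("default-src", []))
--     if not script_src:
--         return False
--     mask = 0
--     for s in script_src:
--         bits = _classify(s)
--         if bits & _BAD:
--             return False
--         mask |= bits
--     return mask == _KEYED | _DYN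
-- ===== Notes on version B (the rewrite author's own statement) =====
-- stated objective: alternative
-- what changed: A makes five full scans of script_src with separate boolean tests; B classifies each token once into a 3-bit mask, accumulates with bitwise OR, early-returns False at the first unsafe/wildcard token, and decides strictness by a single equality test mask == KEYED|DYN.
import Mathlib
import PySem

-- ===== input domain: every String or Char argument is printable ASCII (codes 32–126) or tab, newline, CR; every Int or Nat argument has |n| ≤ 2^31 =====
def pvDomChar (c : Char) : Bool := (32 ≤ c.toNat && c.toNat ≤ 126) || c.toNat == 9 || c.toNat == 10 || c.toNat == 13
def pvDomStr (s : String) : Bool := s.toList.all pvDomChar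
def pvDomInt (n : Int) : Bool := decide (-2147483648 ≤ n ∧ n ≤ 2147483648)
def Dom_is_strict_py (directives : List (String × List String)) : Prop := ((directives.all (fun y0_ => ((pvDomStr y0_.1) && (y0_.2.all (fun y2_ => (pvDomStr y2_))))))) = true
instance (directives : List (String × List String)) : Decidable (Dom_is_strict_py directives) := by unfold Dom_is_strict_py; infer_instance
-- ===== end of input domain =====

-- B replaces A's five full scans by a per-token bitmask classifier folded with bitwise OR
-- (early False on an unsafe/wildcard token) and one final equality test; same return value.

-- ===== PORT A =====
-- A: fallback lookup, empty guard, then five separate scans of script_src.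
def is_strict_py (directives : List (String × List String)) : Bool :=
  let script_src := PySem.Dict.getD (PySem.Dict.mk directives) "script-src"
    (PySem.Dict.getD (PySem.Dict.mk directives) "default-src" [])
  if script_src.isEmpty then false
  else
    let has_nonce := script_src.any (fun s => PySem.Str.isIn "nonce-" s)
    let has_hash := script_src.any (fun s => PySem.Str.startswith s "sha")
    let has_strict_dyn := script_src.contains "'strict-dynamic'"
    let no_unsafe := !script_src.contains "'unsafe-inline'" && !script_src.contains "'unsafe-eval'"
    let no_wildcard := !script_src.contains "*"
    (has_nonce || has_hash) && has_strict_dyn && no_unsafe && no_wildcard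

-- ===== PORT B =====
-- Source B's _classify: one 3-bit mask per token (1 = keyed source, 2 = strict-dynamic, 4 = unsafe/wildcard).
def pvClassify (s : String) : Nat :=
  let b1 := if PySem.Str.isIn "nonce-" s || PySem.Str.startswith s "sha" then (0 : Nat) ||| 1 else 0
  let b2 := if s == "'strict-dynamic'" then b1 ||| 2 else b1
  if s == "'unsafe-inline'" || s == "'unsafe-eval'" || s == "*" then b2 ||| 4 else b2

-- Source B's for-loop with its early `return False`, as structural recursion over the tokens.
def pvLoop (toks : List String) (mask : Nat) : Bool :=
  match toks with
  | [] => mask == 1 ||| 2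
  | s :: rest =>
    let bits := pvClassify s
    if bits &&& 4 ≠ 0 then false else pvLoop rest (mask ||| bits)

def is_strict_py_alt (directives : List (String × List String)) : Bool :=
  let script_src := PySem.Dict.getD (PySem.Dict.mk directives) "script-src"
    (PySem.Dict.getD (PySem.Dict.mk directives) "default-src" [])
  if script_src.isEmpty then false
  else pvLoop script_src 0

-- ===== PRECONDITION & SPEC =====
def Spec_is_strict_py (directives : List (String × List String)) (out : Bool) : Prop := out = is_strict_py_alt directives
instance (directives : List (String × List String)) (out : Bool) : Decidable (Spec_is_strict_py directives out) := by unfold Spec_is_strict_py; infer_instance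

-- ===== CLAIM (what is proved, stated in full; the proofs are below) =====
def Claim_equal_is_strict_py : Prop := ∀ (directives : List (String × List String)), Dom_is_strict_py directives → Spec_is_strict_py directives (is_strict_py directives)

-- ===== LEMMAS AND PROOFS =====
-- mask encoding used by the loop invariant: keyed bit and dynamic bit (bad bit never enters mask).
def pvEnc (k d : Bool) : Nat := (if k then (1 : Nat) else 0) ||| (if d then 2 else 0)

theorem pvLoop_char (xs : List String) (k d : Bool) :
    pvLoop xs (pvEnc k d) =
      (!(xs.any (fun s => s == "'unsafe-inline'" || s == "'unsafe-eval'" || s == "*")) &&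
       (k || xs.any (fun s => PySem.Str.isIn "nonce-" s || PySem.Str.startswith s "sha")) &&
       (d || xs.any (fun s => s == "'strict-dynamic'"))) := by
  induction xs generalizing k d with
  | nil => cases k <;> cases d <;> simp [pvLoop, pvEnc]
  | cons x xs ih =>
    have step : pvLoop (x :: xs) (pvEnc k d) =
        if (x == "'unsafe-inline'" || x == "'unsafe-eval'" || x == "*") then false
        else pvLoop xs (pvEnc (k || (PySem.Str.isIn "nonce-" x || PySem.Str.startswith x "sha"))
                              (d || (x == "'strict-dynamic'"))) := by
      cases hK1 : PySem.Str.isIn "nonce-" x <;>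
      cases hK2 : PySem.Str.startswith x "sha" <;>
      cases hD : (x == "'strict-dynamic'") <;>
      cases hB1 : (x == "'unsafe-inline'") <;>
      cases hB2 : (x == "'unsafe-eval'") <;>
      cases hB3 : (x == "*") <;>
      cases k <;> cases d <;>
        (simp [PySem.Str.isIn] at hK1; simp [PySem.Str.startswith] at hK2;
         simp [pvLoop, pvClassify, pvEnc, hK1, hK2, hD, hB1, hB2, hB3])
    rw [step]
    cases hB : (x == "'unsafe-inline'" || x == "'unsafe-eval'" || x == "*")
    · rw [if_neg (by decide : ¬ (false = true)), ih]
      obtain ⟨⟨h1, h2⟩, h3⟩ : (¬ x = "'unsafe-inline'" ∧ ¬ x = "'unsafe-eval'") ∧ ¬ x = "*" := by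
        simpa [Bool.or_eq_false_iff] using hB
      simp [List.any_cons, beq_eq_false_iff_ne.mpr h1, beq_eq_false_iff_ne.mpr h2,
        beq_eq_false_iff_ne.mpr h3, Bool.or_assoc, Bool.and_assoc]
    · simp [List.any_cons, hB]

theorem pvAny_or {A : Type} (xs : List A) (p q : A → Bool) :
    xs.any (fun x => p x || q x) = (xs.any p || xs.any q) := by
  induction xs with
  | nil => rfl
  | cons x xs ih => cases hp : p x <;> simp [List.any_cons, hp, ih, Bool.or_left_comm]

theorem pvAny_beq (xs : List String) (v : String) :
    xs.any (fun s => s == v) = xs.contains v := by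
  induction xs with
  | nil => rfl
  | cons x xs ih => simp only [List.any_cons, List.contains_cons, ih]; rw [BEq.comm]

-- ===== VERDICT (by name: the statement is the Claim_ definition above) =====
theorem is_strict_py_spec : Claim_equal_is_strict_py := by
  intro directives _
  unfold Spec_is_strict_py is_strict_py is_strict_py_alt
  set xs := PySem.Dict.getD (PySem.Dict.mk directives) "script-src"
    (PySem.Dict.getD (PySem.Dict.mk directives) "default-src" []) with hxs
  by_cases h : xs.isEmpty <;> simp only [h, if_true]
  have h0 : (0 : Nat) = pvEnc false false := rfl
  rw [h0, pvLoop_char]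
  simp only [Bool.false_or, pvAny_or, pvAny_beq]
  cases xs.any (fun s => PySem.Str.isIn "nonce-" s) <;>
  cases xs.any (fun s => PySem.Str.startswith s "sha") <;>
  cases xs.contains "'strict-dynamic'" <;>
  cases xs.contains "'unsafe-inline'" <;>
  cases xs.contains "'unsafe-eval'" <;>
  cases xs.contains "*" <;> rfl
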